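-- pv_equiv track=rewrite | github.com/tensorflow/tensorflow | tf_build_env/Lib/site-packages/setuptools/discovery.py | remove_nested_packages
-- ===== SOURCE A (Python) =====
-- from typing import (
--     TYPE_CHECKING,
--     Callable,
--     Dict,
--     Iterable,
--     Iterator,
--     List,
--     Mapping,
--     Optional,
--     Tuple,
--     Union
-- )
--
-- def remove_nested_packages(packages: List[str]) -> List[str]:
--     """Remove nested packages from a list of packages.
--
--     >>> remove_nested_packages(["a", "a.b1", "a.b2", "a.b1.c1"])
--     ['a']
--     >>> remove_nested_packages(["a", "b", "c.d", "c.d.e.f", "g.h", "a.a1"])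
--     ['a', 'b', 'c.d', 'g.h']
--     """
--     pkgs = sorted(packages, key=len)
--     top_level = pkgs[:]
--     size = len(pkgs)
--     for i, name in enumerate(reversed(pkgs)):
--         if any(name.startswith(f"{other}.") for other in top_level):
--             top_level.pop(size - i - 1)
--
--     return top_level
-- ===== SOURCE B (Python) =====
-- def remove_nested_packages(packages):
--     """Remove nested packages from a list of packages.
--
--     One set-membership pass: a package is kept unless one of its dot-prefix
--     ancestors is itself in the package set.
--     """
--     pkg_set = set(packages)
--     out = []
--     for name in sorted(packages, key=len):
--         if not any(c == "." and name[:j] in pkg_set for j, c in enumerate(name)):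
--             out.append(name)
--     return out
-- ===== Notes on version B (the rewrite author's own statement) =====
-- stated objective: faster
-- what changed: Instead of testing every package against every other package via an O(n^2) scan with in-place pops from the sorted copy, B builds a set of all packages once and keeps a package iff none of its dot-prefix ancestors (one membership test per '.' in the name) is in the set.
import Mathlib
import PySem

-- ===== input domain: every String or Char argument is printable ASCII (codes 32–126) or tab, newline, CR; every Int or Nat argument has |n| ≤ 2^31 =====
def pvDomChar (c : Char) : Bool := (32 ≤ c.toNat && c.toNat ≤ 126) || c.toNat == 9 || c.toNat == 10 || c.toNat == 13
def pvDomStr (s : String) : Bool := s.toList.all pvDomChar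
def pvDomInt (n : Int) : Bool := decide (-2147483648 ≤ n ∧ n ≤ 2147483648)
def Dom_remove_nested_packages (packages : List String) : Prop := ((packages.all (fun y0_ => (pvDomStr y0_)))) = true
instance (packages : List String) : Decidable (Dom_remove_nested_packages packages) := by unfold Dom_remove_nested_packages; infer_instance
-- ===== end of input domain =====

-- B replaces A's quadratic scan of the whole package list for every package by a single
-- set-membership test of each package's dot-prefix ancestors.

-- ===== PORT A =====
-- f"{other}." is ported as other.toList ++ ['.'] with PySem.Chars.startswith on the
-- character lists (exact: a Python str is its sequence of characters).
def pvStepA (size : Nat) (top_level : List String) (e : Int × String) : List String :=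
  if top_level.any (fun other => PySem.Chars.startswith e.2.toList (other.toList ++ ['.'])) then
    match PySem.List.pop? top_level ((size : Int) - e.1 - 1) with
    | some r => r.2
    | none => top_level   -- unreachable: Python's pop index is always in range here
  else top_level

def remove_nested_packages (packages : List String) : List String :=
  let pkgs := PySem.List.sorted packages (fun s => PySem.Str.len s)
  let top_level := pkgs
  let size := pkgs.length
  (PySem.List.enumerate pkgs.reverse 0).foldl (pvStepA size) top_level

-- ===== PORT B =====
def pvHasAncestor (pkg_set : PySem.Set String) (name : String) : Bool :=
  (PySem.List.enumerate name.toList 0).any (fun jc =>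
    jc.2 == '.' && PySem.Set.contains pkg_set (PySem.Str.slice name none (some jc.1)))

def remove_nested_packages_alt (packages : List String) : List String :=
  let pkg_set := PySem.Set.ofList packages
  (PySem.List.sorted packages (fun s => PySem.Str.len s)).foldl
    (fun out name => if pvHasAncestor pkg_set name then out else out ++ [name]) []

-- ===== PRECONDITION & SPEC =====
def Spec_remove_nested_packages (packages : List String) (out : List String) : Prop := out = remove_nested_packages_alt packages
instance (packages : List String) (out : List String) : Decidable (Spec_remove_nested_packages packages out) := by unfold Spec_remove_nested_packages; infer_instance

-- ===== CLAIM (what is proved, stated in full; the proofs are below) =====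
def Claim_equal_remove_nested_packages : Prop := ∀ (packages : List String), Dom_remove_nested_packages packages → Spec_remove_nested_packages packages (remove_nested_packages packages)

-- ===== LEMMAS AND PROOFS =====

-- "q is a dot-prefix ancestor of nc", characterised by the split position
theorem pvDotPrefix_iff (qc nc : List Char) :
    qc ++ ['.'] <+: nc ↔ nc.take qc.length = qc ∧ nc[qc.length]? = some '.' := by
  constructor
  · rintro ⟨t, rfl⟩
    constructor
    · simp
    · simp
  · rintro ⟨h1, h2⟩
    have hlt : qc.length < nc.length := by
      by_contra hge
      rw [List.getElem?_eq_none (by omega)] at h2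
      simp at h2
    have hget : nc[qc.length] = '.' := by
      rw [List.getElem?_eq_getElem hlt] at h2
      exact Option.some.inj h2
    refine ⟨nc.drop (qc.length + 1), ?_⟩
    have hd : nc.drop qc.length = '.' :: nc.drop (qc.length + 1) := by
      rw [List.drop_eq_getElem_cons hlt, hget]
    calc qc ++ ['.'] ++ nc.drop (qc.length + 1)
        = qc ++ ('.' :: nc.drop (qc.length + 1)) := by simp
      _ = nc.take qc.length ++ nc.drop qc.length := by rw [h1, hd]
      _ = nc := List.take_append_drop _ _

theorem pvSlice_toList (name : String) (k : Nat) :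
    (PySem.Str.slice name none (some (k : Int))).toList = name.toList.take k := by
  simp [PySem.Str.slice, PySem.Chars.slice]

-- B's generator over enumerate(name) finds exactly the dot-prefix ancestors present in the set
theorem pvHasAncestor_iff (S : List String) (name : String) :
    pvHasAncestor (PySem.Set.ofList S) name = true ↔
      ∃ q ∈ S, q.toList ++ ['.'] <+: name.toList := by
  unfold pvHasAncestor
  rw [List.any_eq_true]
  constructor
  · rintro ⟨jc, hmem, hc⟩
    rw [PySem.List.mem_enumerate_iff] at hmem
    obtain ⟨k, hk, rfl⟩ := hmem
    simp only [Bool.and_eq_true, beq_iff_eq] at hc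
    obtain ⟨hdot, hcont⟩ := hc
    have hmemS : PySem.Str.slice name none (some ((0:Int) + k)) ∈ S :=
      (PySem.Set.mem_ofList S _).mp (by simpa [PySem.Set.contains] using hcont)
    refine ⟨_, hmemS, ?_⟩
    rw [pvDotPrefix_iff]
    have htl : (PySem.Str.slice name none (some ((0:Int) + k))).toList = name.toList.take k := by
      rw [show (0:Int) + k = (k:Int) by ring, pvSlice_toList]
    rw [htl]
    rw [List.length_take, Nat.min_eq_left (le_of_lt hk)]
    exact ⟨rfl, by rw [List.getElem?_eq_getElem hk, hdot]⟩
  · rintro ⟨q, hq, hpre⟩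
    rw [pvDotPrefix_iff] at hpre
    obtain ⟨htake, hget⟩ := hpre
    have hk : q.toList.length < name.toList.length := by
      by_contra hge
      rw [List.getElem?_eq_none (by omega)] at hget
      simp at hget
    refine ⟨((0:Int) + q.toList.length, name.toList[q.toList.length]), ?_, ?_⟩
    · rw [PySem.List.mem_enumerate_iff]
      exact ⟨q.toList.length, hk, rfl⟩
    · simp only [Bool.and_eq_true, beq_iff_eq]
      constructor
      · rw [List.getElem?_eq_getElem hk] at hget
        exact Option.some.inj hget
      · have heq : PySem.Str.slice name none (some ((0:Int) + q.toList.length)) = q := by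
          apply String.toList_inj.mp
          rw [show (0:Int) + q.toList.length = (q.toList.length : Int) by ring, pvSlice_toList, htake]
        rw [heq]
        simpa [PySem.Set.contains, PySem.Set.mem_ofList] using hq

-- A's `any` over the evolving top_level equals the same `any` over the full sorted list
theorem pvCond_eq (pkgs : List String)
    (hp : pkgs.Pairwise (fun a b => PySem.Str.len a ≤ PySem.Str.len b))
    (k : Nat) (hk0 : 0 < k) (hkm : k - 1 < pkgs.length) :
    ((pkgs.take k ++ (pkgs.drop k).filter
        (fun name => !(pkgs.any (fun q => PySem.Chars.startswith name.toList (q.toList ++ ['.']))))).any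
      (fun other => PySem.Chars.startswith (pkgs[k-1]).toList (other.toList ++ ['.'])))
    = pkgs.any (fun q => PySem.Chars.startswith (pkgs[k-1]).toList (q.toList ++ ['.'])) := by
  rw [Bool.eq_iff_iff, List.any_eq_true, List.any_eq_true]
  have hname_take : pkgs[k-1] ∈ pkgs.take k := by
    have : (pkgs.take k)[k-1]'(by simp; omega) = pkgs[k-1] := List.getElem_take
    rw [← this]; exact List.getElem_mem _
  constructor
  · rintro ⟨q, hq, hc⟩
    rcases List.mem_append.mp hq with hq | hq
    · exact ⟨q, List.mem_of_mem_take hq, hc⟩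
    · exact ⟨q, List.mem_of_mem_drop (List.mem_of_mem_filter hq), hc⟩
  · rintro ⟨q, hq, hc⟩
    refine ⟨q, List.mem_append.mpr (Or.inl ?_), hc⟩
    have hpre := (PySem.Chars.startswith_iff _ _).mp hc
    have hlen : q.length < (pkgs[k-1]).length := by
      have := hpre.length_le
      simp at this; omega
    rw [← List.take_append_drop k pkgs] at hp
    obtain ⟨-, -, hcross⟩ := List.pairwise_append.mp hp
    rcases List.mem_append.mp (by rw [List.take_append_drop]; exact hq :
        q ∈ pkgs.take k ++ pkgs.drop k) with h1 | h1
    · exact h1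
    · exfalso
      have := hcross _ hname_take _ h1
      simp [PySem.Str.len_eq] at this
      omega

-- the loop invariant: after t iterations top_level is the untouched prefix plus the filtered suffix
theorem pvLoopA (pkgs : List String)
    (hp : pkgs.Pairwise (fun a b => PySem.Str.len a ≤ PySem.Str.len b))
    (t : Nat) (ht : t ≤ pkgs.length) :
    ((PySem.List.enumerate pkgs.reverse 0).take t).foldl (pvStepA pkgs.length) pkgs =
      pkgs.take (pkgs.length - t) ++ (pkgs.drop (pkgs.length - t)).filter
        (fun name => !(pkgs.any (fun q => PySem.Chars.startswith name.toList (q.toList ++ ['.'])))) := by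
  induction t with
  | zero => simp
  | succ t ih =>
    have htl : t < pkgs.length := by omega
    have hk1 : pkgs.length - 1 - t < pkgs.length := by omega
    have henum : (PySem.List.enumerate pkgs.reverse 0)[t]? =
        some ((0:Int) + t, pkgs[pkgs.length - 1 - t]'hk1) := by
      rw [PySem.List.getElem?_enumerate, List.getElem?_eq_getElem (by simpa using htl)]
      simp [List.getElem_reverse]
    rw [List.take_add_one, henum, List.foldl_append, ih (by omega)]
    simp only [Option.toList_some, List.foldl_cons, List.foldl_nil]
    obtain ⟨k, hkdef⟩ : ∃ k, pkgs.length - t = k := ⟨_, rfl⟩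
    rw [hkdef]
    have hk0 : 0 < k := by omega
    have hkm : k - 1 < pkgs.length := by omega
    have hidx : pkgs.length - 1 - t = k - 1 := by omega
    have hsucc : pkgs.length - (t+1) = k - 1 := by omega
    simp only [hidx, hsucc]
    have htake : pkgs.take k = pkgs.take (k-1) ++ [pkgs[k-1]'hkm] := by
      conv_lhs => rw [show k = (k-1) + 1 by omega]
      rw [List.take_add_one, List.getElem?_eq_getElem hkm]
      simp
    have hdrop : pkgs.drop (k-1) = pkgs[k-1]'hkm :: pkgs.drop k := by
      rw [List.drop_eq_getElem_cons hkm, show (k-1) + 1 = k by omega]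
    have hlen_take : (pkgs.take (k-1)).length = k - 1 := by
      rw [List.length_take]; omega
    have hSlen : k - 1 < (pkgs.take k ++ (pkgs.drop k).filter
        (fun name => !(pkgs.any (fun q => PySem.Chars.startswith name.toList (q.toList ++ ['.']))))).length := by
      rw [List.length_append, List.length_take]; omega
    unfold pvStepA
    rw [pvCond_eq pkgs hp k hk0 hkm]
    by_cases hP : pkgs.any (fun q => PySem.Chars.startswith (pkgs[k-1]'hkm).toList (q.toList ++ ['.'])) = true
    · rw [if_pos hP]
      have hInt : ((pkgs.length : Int) - ((0:Int) + t) - 1) = ((k-1 : Nat) : Int) := by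
        omega
      rw [hInt, PySem.List.pop?_natCast _ _ hSlen]
      have herase : (pkgs.take k ++ (pkgs.drop k).filter
          (fun name => !(pkgs.any (fun q => PySem.Chars.startswith name.toList (q.toList ++ ['.']))))).eraseIdx (k-1) =
          pkgs.take (k-1) ++ (pkgs.drop k).filter
            (fun name => !(pkgs.any (fun q => PySem.Chars.startswith name.toList (q.toList ++ ['.'])))) := by
        rw [htake, List.append_assoc, List.singleton_append]
        have hgen : ∀ (l r : List String) (x : String),
            (l ++ x :: r).eraseIdx l.length = l ++ r := by
          intro l r x
          simp [List.eraseIdx_append_of_length_le]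
        have h2 := hgen (pkgs.take (k-1)) ((pkgs.drop k).filter
          (fun name => !(pkgs.any (fun q => PySem.Chars.startswith name.toList (q.toList ++ ['.'])))))
          (pkgs[k-1]'hkm)
        rw [hlen_take] at h2
        exact h2
      rw [hdrop, List.filter_cons]
      simp only [hP, Bool.not_true, Bool.false_eq_true, if_false]
      exact herase
    · rw [if_neg hP]
      rw [hdrop, List.filter_cons]
      simp only [Bool.not_eq_true] at hP
      simp only [hP, Bool.not_false, if_true]
      rw [htake, List.append_assoc, List.singleton_append]

-- A computes a filter of the sorted list
theorem pvA_eq_filter (packages : List String) :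
    remove_nested_packages packages =
      (PySem.List.sorted packages (fun s => PySem.Str.len s)).filter
        (fun name => !((PySem.List.sorted packages (fun s => PySem.Str.len s)).any
          (fun q => PySem.Chars.startswith name.toList (q.toList ++ ['.'])))) := by
  have h := pvLoopA (PySem.List.sorted packages (fun s => PySem.Str.len s))
    (PySem.List.sorted_pairwise packages (fun s => PySem.Str.len s))
    (PySem.List.sorted packages (fun s => PySem.Str.len s)).length le_rfl
  rw [List.take_of_length_le (by simp [PySem.List.length_enumerate])] at h
  simpa [remove_nested_packages] using h

-- B computes a filter of the sorted list
theorem pvB_eq_filter (packages : List String) :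
    remove_nested_packages_alt packages =
      (PySem.List.sorted packages (fun s => PySem.Str.len s)).filter
        (fun name => !pvHasAncestor (PySem.Set.ofList packages) name) := by
  unfold remove_nested_packages_alt
  show (PySem.List.sorted packages (fun s => PySem.Str.len s)).foldl
      (fun out name => if pvHasAncestor (PySem.Set.ofList packages) name then out else out ++ [name]) [] = _
  have hstep : (fun (out : List String) name =>
      if pvHasAncestor (PySem.Set.ofList packages) name then out else out ++ [name])
      = (fun (acc : List String) x =>
      if (!pvHasAncestor (PySem.Set.ofList packages) x) = true then acc ++ [id x] else acc) := by
    funext out name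
    cases h : pvHasAncestor (PySem.Set.ofList packages) name <;> simp [h]
  rw [hstep, PySem.List.foldl_append_if]
  simp

-- ===== VERDICT (by name: the statement is the Claim_ definition above) =====
theorem remove_nested_packages_spec : Claim_equal_remove_nested_packages := by
  intro packages _
  unfold Spec_remove_nested_packages
  rw [pvA_eq_filter, pvB_eq_filter]
  apply List.filter_congr
  intro name hmem
  have hany : (PySem.List.sorted packages (fun s => PySem.Str.len s)).any
      (fun q => PySem.Chars.startswith name.toList (q.toList ++ ['.']))
      = pvHasAncestor (PySem.Set.ofList packages) name := by
    rw [Bool.eq_iff_iff, List.any_eq_true, pvHasAncestor_iff]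
    constructor
    · rintro ⟨q, hq, hc⟩
      exact ⟨q, (PySem.List.mem_sorted packages _ false q).mp hq,
        (PySem.Chars.startswith_iff _ _).mp hc⟩
    · rintro ⟨q, hq, hpre⟩
      exact ⟨q, (PySem.List.mem_sorted packages _ false q).mpr hq,
        (PySem.Chars.startswith_iff _ _).mpr hpre⟩
  rw [hany]
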